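-- pv_equiv track=rewrite | github.com/swamy-lab-sys/interview-assistant-pro | question_validator.py | split_merged_questions
-- ===== SOURCE A (Python) =====
-- QUESTION_STARTERS = [
--     "what is", "what are", "what does", "what do", "what's",
--     "why is", "why do", "why does", "why would",
--     "how do", "how does", "how to", "how can", "how would",
--     "when do", "when does", "when should", "when would",
--     "where do", "where does", "where is",
--     "which", "is there", "are there", "can you", "could you",
--     "explain", "describe", "define", "compare", "tell me",
--     "difference between", "walk me through",
--     "write", "implement", "create", "give me",
--     "have you", "do you have", "how much", "how many years",
-- ]
--
-- def split_merged_questions(text: str) -> str: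
--     """Extract the best question from merged audio."""
--     if not text:
--         return text
--
--     text = text.strip()
--     lower = text.lower()
--
--     positions = []
--     for starter in QUESTION_STARTERS:
--         idx = 0
--         while True:
--             pos = lower.find(starter, idx)
--             if pos == -1:
--                 break
--             if pos == 0 or text[pos-1] in ' ,.':
--                 positions.append((pos, starter))
--             idx = pos + 1
--
--     if len(positions) < 2:
--         return text
--
--     positions.sort()
--
--     for pos, starter in reversed(positions):
--         candidate = text[pos:].strip()
--         if len(candidate.split()) >= 4:
--             return candidate
--
--     return text
-- ===== SOURCE B (Python) =====
-- QUESTION_STARTERS = [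
--     "what is", "what are", "what does", "what do", "what's",
--     "why is", "why do", "why does", "why would",
--     "how do", "how does", "how to", "how can", "how would",
--     "when do", "when does", "when should", "when would",
--     "where do", "where does", "where is",
--     "which", "is there", "are there", "can you", "could you",
--     "explain", "describe", "define", "compare", "tell me",
--     "difference between", "walk me through",
--     "write", "implement", "create", "give me",
--     "have you", "do you have", "how much", "how many years",
-- ]
--
-- def split_merged_questions(text: str) -> str:
--     """Extract the best question from merged audio (single left-to-right scan)."""
--     if not text:
--         return text
--
--     text = text.strip()
--     lower = text.lower()
--
--     count = 0
--     hits = []  # word-boundary positions where at least one starter matches, ascending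
--     for i in range(len(text)):
--         if i == 0 or text[i - 1] in ' ,.':
--             m = sum(1 for s in QUESTION_STARTERS if lower.startswith(s, i))
--             if m:
--                 count += m
--                 hits.append(i)
--
--     if count < 2:
--         return text
--
--     for i in reversed(hits):
--         candidate = text[i:].strip()
--         if len(candidate.split()) >= 4:
--             return candidate
--
--     return text
-- ===== Notes on version B (the rewrite author's own statement) =====
-- stated objective: alternative
-- what changed: Inverts the nested loops: instead of scanning the whole text once per starter with str.find and then sorting the (position, starter) pairs, B makes a single left-to-right pass over word-boundary positions, counting every starter that matches at each boundary, so the hit positions come out already in order and no sort is needed.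
import Mathlib
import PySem

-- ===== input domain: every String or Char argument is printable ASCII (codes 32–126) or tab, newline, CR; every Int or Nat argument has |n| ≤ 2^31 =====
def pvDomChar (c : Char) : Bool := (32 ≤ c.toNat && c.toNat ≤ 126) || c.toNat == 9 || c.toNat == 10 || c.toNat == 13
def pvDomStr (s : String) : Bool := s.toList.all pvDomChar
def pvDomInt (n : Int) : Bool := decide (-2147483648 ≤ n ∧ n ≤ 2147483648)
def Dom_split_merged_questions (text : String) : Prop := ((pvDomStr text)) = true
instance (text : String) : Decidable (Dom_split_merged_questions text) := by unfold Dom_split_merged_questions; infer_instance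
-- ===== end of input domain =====

-- B inverts A's nested loops: one left-to-right pass over word boundaries testing all starters,
-- collecting hit positions already in order, instead of a per-starter str.find scan plus a sort.


def QUESTION_STARTERS : List String := [
    "what is", "what are", "what does", "what do", "what's",
    "why is", "why do", "why does", "why would",
    "how do", "how does", "how to", "how can", "how would",
    "when do", "when does", "when should", "when would",
    "where do", "where does", "where is",
    "which", "is there", "are there", "can you", "could you",
    "explain", "describe", "define", "compare", "tell me",
    "difference between", "walk me through",
    "write", "implement", "create", "give me",
    "have you", "do you have", "how much", "how many years"]

-- ===== PORT A =====
-- the inner 'while True: pos = lower.find(starter, idx) …' loop of A; fuel bounds the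
-- iteration count (each step strictly increases idx, so t.length + 1 steps suffice)
def pvFindAllA (t lo sc : List Char) (s : String) : Nat → Int → List (Int × String) → List (Int × String)
  | 0, _, acc => acc
  | fuel + 1, idx, acc =>
    let pos := PySem.Chars.findFrom lo sc idx
    if pos = -1 then acc
    else
      -- 'text[pos-1] in " ,."' : pos ≥ 1 in that branch, so the pyGetD default is never read
      let acc' := if pos = 0 ∨ PySem.Chars.isIn [PySem.List.pyGetD t (pos - 1) ' '] (" ,.".toList) = true
                  then acc ++ [(pos, s)] else acc
      pvFindAllA t lo sc s fuel (pos + 1) acc'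

-- 'for pos, starter in reversed(positions): …' tail of A
def pvPickA (t : List Char) : List (Int × String) → String
  | [] => String.ofList t
  | (pos, _) :: rest =>
    let cand := PySem.Chars.strip (PySem.List.slice t (some pos) none)
    if 4 ≤ (PySem.Chars.split₀ cand).length then String.ofList cand else pvPickA t rest

def split_merged_questions (text : String) : String :=
  if text = "" then text
  else
    let t := (PySem.Str.strip text).toList
    let lo := PySem.Chars.lower t
    let positions := QUESTION_STARTERS.foldl
      (fun acc s => pvFindAllA t lo s.toList s (t.length + 1) 0 acc) []
    if positions.length < 2 then String.ofList t
    else pvPickA t ((PySem.List.sorted2 positions (fun p => p.1) (fun p => p.2) false).reverse)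

-- ===== PORT B =====
-- 'for i in reversed(hits): …' tail of B
def pvPickB (t : List Char) : List Nat → String
  | [] => String.ofList t
  | i :: rest =>
    let cand := PySem.Chars.strip (List.drop i t)
    if 4 ≤ (PySem.Chars.split₀ cand).length then String.ofList cand else pvPickB t rest

def split_merged_questions_alt (text : String) : String :=
  if text = "" then text
  else
    let t := (PySem.Str.strip text).toList
    let lo := PySem.Chars.lower t
    -- single pass: 'for i in range(len(text)): if boundary: m = sum(…); …'
    let st := (List.range t.length).foldl
      (fun (st : Int × List Nat) i =>
        if i = 0 ∨ PySem.Chars.isIn [t.getD (i - 1) ' '] (" ,.".toList) = true then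
          let m : Int := QUESTION_STARTERS.countP (fun s => PySem.Chars.startswith (List.drop i lo) s.toList)
          if m ≠ 0 then (st.1 + m, st.2 ++ [i]) else st
        else st)
      (0, [])
    if st.1 < 2 then String.ofList t
    else pvPickB t st.2.reverse

-- ===== PRECONDITION & SPEC =====
def Spec_split_merged_questions (text : String) (out : String) : Prop := out = split_merged_questions_alt text
instance (text : String) (out : String) : Decidable (Spec_split_merged_questions text out) := by unfold Spec_split_merged_questions; infer_instance

-- ===== CLAIM (what is proved, stated in full; the proofs are below) =====
def Claim_equal_split_merged_questions : Prop := ∀ (text : String), Dom_split_merged_questions text → Spec_split_merged_questions text (split_merged_questions text)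

-- ===== LEMMAS AND PROOFS =====

-- ===== proof-side definitions =====
def pvBdry (t : List Char) (i : Nat) : Bool :=
  decide (i = 0) || PySem.Chars.isIn [t.getD (i - 1) ' '] (" ,.".toList)

def pvOcc (t lo sc : List Char) (i : Nat) : Bool :=
  PySem.Chars.startswith (List.drop i lo) sc && pvBdry t i

def pvG (t lo : List Char) (i : Nat) : Nat :=
  QUESTION_STARTERS.countP (fun s => pvOcc t lo s.toList i)

def pvCandOK (t : List Char) (pos : Int) : Bool :=
  decide (4 ≤ (PySem.Chars.split₀ (PySem.Chars.strip (PySem.List.slice t (some pos) none))).length)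

-- boundary condition of A at an occurrence position ↑j equals pvBdry
lemma pvBdry_eqA (t : List Char) (j : Nat) :
    ((j : Int) = 0 ∨ PySem.Chars.isIn [PySem.List.pyGetD t ((j : Int) - 1) ' '] (" ,.".toList) = true)
      ↔ pvBdry t j = true := by
  unfold pvBdry
  rcases Nat.eq_zero_or_pos j with h | h
  · subst h; simp
  · have hj : (j : Int) - 1 = ((j - 1 : Nat) : Int) := by omega
    rw [hj, PySem.List.pyGetD_natCast]
    have : ¬ ((j : Int) = 0) := by omega
    simp [this, Nat.pos_iff_ne_zero.mp h]

-- filter-split: pull out the first position where q holds (r is the collection filter)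
lemma pvFilter_range_split (n j : Nat) (q r : Nat → Bool) (hj : j < n) (hqj : q j = true)
    (hmin : ∀ i < j, q i = false) :
    (List.range n).filter (fun i => q i && r i)
      = (if r j then [j] else [])
        ++ (List.range n).filter (fun i => decide (j + 1 ≤ i) && q i && r i) := by
  induction n with
  | zero => omega
  | succ n ih =>
    rw [List.range_succ, List.filter_append, List.filter_append]
    rcases Nat.lt_or_ge j n with h | h
    · rw [ih h]
      have he : (List.filter (fun i => q i && r i) [n])
          = List.filter (fun i => decide (j + 1 ≤ i) && q i && r i) [n] := by
        simp only [List.filter_singleton]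
        have hd : decide (j + 1 ≤ n) = true := by simp; omega
        rw [hd, Bool.true_and]
      rw [he, List.append_assoc]
    · have hjn : j = n := by omega
      subst hjn
      have h1 : (List.range j).filter (fun i => q i && r i) = [] := by
        apply List.filter_eq_nil_iff.mpr
        intro a ha; simp [List.mem_range] at ha; simp [hmin a ha]
      have h2 : (List.range j).filter (fun i => decide (j + 1 ≤ i) && q i && r i) = [] := by
        apply List.filter_eq_nil_iff.mpr
        intro a ha; simp [List.mem_range] at ha
        have : ¬ (j + 1 ≤ a) := by omega
        simp [this]
      have h3 : (List.filter (fun i => decide (j + 1 ≤ i) && q i && r i) [j]) = [] := by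
        simp
      rw [h1, h2, h3, List.filter_singleton]
      by_cases hr : r j = true
      · simp [hqj, hr]
      · simp [hqj, hr]

-- step 1: characterize A's find-loop
lemma pvFindAllA_eq (t lo sc : List Char) (s : String) (hsc : sc ≠ [])
    (hlen : lo.length = t.length) :
    ∀ (fuel idx : Nat) (acc : List (Int × String)), idx ≤ lo.length → lo.length + 1 - idx ≤ fuel →
    pvFindAllA t lo sc s fuel (idx : Int) acc
      = acc ++ ((List.range t.length).filter
          (fun i => decide (idx ≤ i) && pvOcc t lo sc i)).map (fun (i : Nat) => ((i : Int), s)) := by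
  intro fuel
  induction fuel with
  | zero => intro idx acc hidx hfuel; omega
  | succ fuel ih =>
    intro idx acc hidx hfuel
    simp only [pvFindAllA]
    by_cases hpos : PySem.Chars.findFrom lo sc (idx : Int) = -1
    · rw [if_pos hpos]
      have hno : ¬ sc <:+: List.drop idx lo :=
        (PySem.Chars.findFrom_natCast_eq_neg_one_iff lo sc idx hidx).mp hpos
      have hfil : (List.range t.length).filter (fun i => decide (idx ≤ i) && pvOcc t lo sc i) = [] := by
        apply List.filter_eq_nil_iff.mpr
        intro a _ hcon
        simp only [pvOcc, Bool.and_eq_true, decide_eq_true_eq] at hcon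
        obtain ⟨hia, hsw, _⟩ := hcon
        apply hno
        have hpre : sc <+: List.drop a lo := (PySem.Chars.startswith_iff _ _).mp hsw
        have : List.drop a lo = List.drop (a - idx) (List.drop idx lo) := by
          rw [List.drop_drop]; congr 1; omega
        rw [this] at hpre
        exact hpre.isInfix.trans (List.drop_suffix _ _).isInfix
      rw [hfil]; simp
    · rw [if_neg hpos]
      obtain ⟨h1, h2, h3⟩ := PySem.Chars.findFrom_natCast_spec lo sc idx hidx hpos
      set pos := PySem.Chars.findFrom lo sc (idx : Int) with hposdef
      have hpos0 : 0 ≤ pos := le_trans (by omega) h1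
      set j := pos.toNat with hjdef
      have hposj : pos = (j : Int) := by omega
      have hij : idx ≤ j := by omega
      have hjlt : j < lo.length := by
        by_contra hge
        have : List.drop j lo = [] := List.drop_eq_nil_of_le (by omega)
        rw [this] at h2
        exact hsc (List.prefix_nil.mp h2)
      -- boundary condition
      have hcond : (pos = 0 ∨ PySem.Chars.isIn [PySem.List.pyGetD t (pos - 1) ' '] (" ,.".toList) = true)
          ↔ pvBdry t j = true := by rw [hposj]; exact pvBdry_eqA t j
      rw [if_congr hcond rfl rfl]
      -- the recursive call
      have hrec := ih (j + 1)
      have hsplit : (List.range t.length).filter (fun i => decide (idx ≤ i) && pvOcc t lo sc i)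
          = (if pvBdry t j then [j] else [])
            ++ (List.range t.length).filter (fun i => decide (j + 1 ≤ i) && pvOcc t lo sc i) := by
        have e1 : ∀ (m : Nat) (P : Nat → Bool),
            (List.range m).filter (fun i => P i && pvOcc t lo sc i)
            = (List.range m).filter (fun i => (P i && PySem.Chars.startswith (List.drop i lo) sc) && pvBdry t i) := by
          intro m P; apply List.filter_congr; intro a _
          simp [pvOcc, Bool.and_assoc]
        rw [e1, e1]
        have := pvFilter_range_split t.length j
          (fun i => decide (idx ≤ i) && PySem.Chars.startswith (List.drop i lo) sc)
          (fun i => pvBdry t i) (by omega)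
          (by simp only [Bool.and_eq_true, decide_eq_true_eq]
              exact ⟨hij, (PySem.Chars.startswith_iff _ _).mpr h2⟩)
          (by intro i hi
              by_cases hidxi : idx ≤ i
              · have := h3 i hidxi hi
                simp only [Bool.and_eq_true, decide_eq_true_eq, not_and]
                simp only [Bool.and_eq_true, Bool.not_eq_true] at *
                rcases hx : PySem.Chars.startswith (List.drop i lo) sc with _ | _
                · simp
                · exact absurd ((PySem.Chars.startswith_iff _ _).mp hx) this
              · simp [hidxi])
        rw [this]
        congr 1
        apply List.filter_congr; intro a _
        by_cases hja : j + 1 ≤ a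
        · have : idx ≤ a := by omega
          simp [hja, this, Bool.and_assoc]
        · simp [hja]
      rw [hsplit, hposj]
      have hone : (j : Int) + 1 = ((j + 1 : Nat) : Int) := by omega
      rw [hone]
      by_cases hb : pvBdry t j = true
      · rw [if_pos hb, if_pos hb,
           hrec (acc ++ [((j : Int), s)]) (by omega) (by omega)]
        simp
      · rw [if_neg hb, if_neg hb, hrec acc (by omega) (by omega)]
        simp

-- pvG as B's step computes it
lemma pvG_eq (t lo : List Char) (i : Nat) :
    pvG t lo i = if pvBdry t i = true
      then QUESTION_STARTERS.countP (fun s => PySem.Chars.startswith (List.drop i lo) s.toList)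
      else 0 := by
  by_cases hb : pvBdry t i = true
  · rw [if_pos hb]
    apply List.countP_congr
    intro s _
    simp [pvOcc, hb]
  · rw [if_neg hb]
    apply List.countP_eq_zero.mpr
    intro s _
    simp [pvOcc]
    intro _
    exact Bool.not_eq_true _ |>.mp hb ▸ (by simpa using hb)

-- Nat: sum of 0/1 indicators is countP
lemma pvSum_ite (l : List Nat) (p : Nat → Bool) :
    (l.map (fun i => if p i then 1 else 0)).sum = l.countP p := by
  induction l with
  | nil => rfl
  | cons x xs ih => simp [List.countP_cons, ih]; by_cases h : p x <;> simp [h]; omega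

-- double counting: Σ_i |{s : P s i}| = Σ_s |{i : P s i}|
lemma pvSwap (S : List String) : ∀ (l : List Nat) (P : String → Nat → Bool),
    (l.map (fun i => S.countP (fun s => P s i))).sum = (S.map (fun s => l.countP (fun i => P s i))).sum := by
  induction S with
  | nil => intro l P; simp
  | cons s S ih =>
    intro l P
    simp only [List.map_cons, List.sum_cons]
    have : (l.map (fun i => List.countP (fun s' => P s' i) (s :: S))).sum
        = (l.map (fun i => List.countP (fun s' => P s' i) S)).sum + (l.map (fun i => if P s i then 1 else 0)).sum := by
      rw [← List.sum_map_add]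
      apply congrArg
      apply List.map_congr_left
      intro i _
      simp [List.countP_cons]
    rw [this, ih l P, pvSum_ite l (fun i => P s i)]
    omega

-- step 2: characterize B's single pass
lemma pvStepB_foldl (t lo : List Char) : ∀ (l : List Nat) (c : Int) (h : List Nat),
    l.foldl (fun (st : Int × List Nat) i =>
        if i = 0 ∨ PySem.Chars.isIn [t.getD (i - 1) ' '] (" ,.".toList) = true then
          let m : Int := QUESTION_STARTERS.countP (fun s => PySem.Chars.startswith (List.drop i lo) s.toList)
          if m ≠ 0 then (st.1 + m, st.2 ++ [i]) else st
        else st) (c, h)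
      = (c + ((l.map (pvG t lo)).sum : Nat), h ++ l.filter (fun i => decide (pvG t lo i ≠ 0))) := by
  intro l
  induction l with
  | nil => intro c h; simp
  | cons x xs ih =>
    intro c h
    rw [List.foldl_cons, List.filter_cons]
    have hbx : (x = 0 ∨ PySem.Chars.isIn [t.getD (x - 1) ' '] (" ,.".toList) = true) ↔ pvBdry t x = true := by
      simp [pvBdry]
    by_cases hb : pvBdry t x = true
    · rw [if_pos (hbx.mpr hb)]
      have hg : pvG t lo x = QUESTION_STARTERS.countP (fun s => PySem.Chars.startswith (List.drop x lo) s.toList) := by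
        rw [pvG_eq, if_pos hb]
      by_cases hm : (QUESTION_STARTERS.countP (fun s => PySem.Chars.startswith (List.drop x lo) s.toList) : Int) ≠ 0
      · rw [if_pos hm]
        rw [ih]
        have hgn : pvG t lo x ≠ 0 := by
          intro h0; apply hm; rw [← hg, h0]; simp
        rw [← hg]
        refine Prod.ext ?_ ?_
        · simp only [List.map_cons, List.sum_cons]
          push_cast
          ring
        · simp [hgn, List.append_assoc]
      · rw [if_neg hm, ih]
        have hgz : pvG t lo x = 0 := by
          rw [hg]; omega
        simp [hgz]
    · rw [if_neg (fun hc => hb (hbx.mp hc)), ih]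
      have hgz : pvG t lo x = 0 := by rw [pvG_eq, if_neg hb]
      simp [hgz]

def pvOutA (t : List Char) (oA : Option (Int × String)) : String :=
  match oA with
  | some p => String.ofList (PySem.Chars.strip (PySem.List.slice t (some p.1) none))
  | none => String.ofList t

def pvOutB (t : List Char) (oB : Option Nat) : String :=
  match oB with
  | some i => String.ofList (PySem.Chars.strip (PySem.List.slice t (some (i : Int)) none))
  | none => String.ofList t


-- step 3: the two selection tails
lemma pvPickA_eq (t : List Char) : ∀ (l : List (Int × String)),
    pvPickA t l = pvOutA t (l.find? (fun p => pvCandOK t p.1)) := by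
  intro l
  induction l with
  | nil => rfl
  | cons p rest ih =>
    obtain ⟨pos, s⟩ := p
    show (if 4 ≤ (PySem.Chars.split₀ (PySem.Chars.strip (PySem.List.slice t (some pos) none))).length
          then String.ofList (PySem.Chars.strip (PySem.List.slice t (some pos) none)) else pvPickA t rest) = _
    by_cases hc : pvCandOK t pos = true
    · have hp : 4 ≤ (PySem.Chars.split₀ (PySem.Chars.strip (PySem.List.slice t (some pos) none))).length := by
        simpa [pvCandOK] using hc
      rw [if_pos hp, List.find?_cons_of_pos (by simpa using hc)]
      rfl
    · have hp : ¬ 4 ≤ (PySem.Chars.split₀ (PySem.Chars.strip (PySem.List.slice t (some pos) none))).length := by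
        simpa [pvCandOK] using hc
      rw [if_neg hp, List.find?_cons_of_neg (by simpa using hc), ih]

lemma pvPickB_eq (t : List Char) : ∀ (l : List Nat),
    pvPickB t l = pvOutB t (l.find? (fun (i : Nat) => pvCandOK t (i : Int))) := by
  intro l
  induction l with
  | nil => rfl
  | cons i rest ih =>
    show (if 4 ≤ (PySem.Chars.split₀ (PySem.Chars.strip (List.drop i t))).length
          then String.ofList (PySem.Chars.strip (List.drop i t)) else pvPickB t rest) = _
    have hdrop : PySem.List.slice t (some (i : Int)) none = List.drop i t := PySem.List.slice_from_natCast t i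
    by_cases hc : pvCandOK t (i : Int) = true
    · have hp : 4 ≤ (PySem.Chars.split₀ (PySem.Chars.strip (List.drop i t))).length := by
        have := hc; simp [pvCandOK, hdrop] at this; exact this
      rw [if_pos hp, List.find?_cons_of_pos (by simpa using hc)]
      show String.ofList (PySem.Chars.strip (List.drop i t))
          = String.ofList (PySem.Chars.strip (PySem.List.slice t (some (i : Int)) none))
      rw [hdrop]
    · have hp : ¬ 4 ≤ (PySem.Chars.split₀ (PySem.Chars.strip (List.drop i t))).length := by
        have := hc; simp [pvCandOK, hdrop] at this; omega
      rw [if_neg hp, List.find?_cons_of_neg (by simpa using hc), ih]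

-- step 4: find? on weakly-descending Int lists depends only on the member set
lemma pvFind?_max (p : Int → Bool) : ∀ (l : List Int), l.Pairwise (fun a b => b ≤ a) →
    ∀ a, l.find? p = some a → ∀ y ∈ l, p y = true → y ≤ a := by
  intro l
  induction l with
  | nil => intro _ a ha; simp at ha
  | cons x xs ih =>
    intro hpw a ha y hy hpy
    rw [List.pairwise_cons] at hpw
    by_cases hx : p x = true
    · rw [List.find?_cons_of_pos hx] at ha
      obtain rfl : x = a := by injection ha
      rcases List.mem_cons.mp hy with rfl | hy'
      · exact le_refl _
      · exact hpw.1 y hy'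
    · rw [List.find?_cons_of_neg hx] at ha
      rcases List.mem_cons.mp hy with rfl | hy'
      · exact absurd hpy hx
      · exact ih hpw.2 a ha y hy' hpy

lemma pvFind?_eq (p : Int → Bool) (l₁ l₂ : List Int)
    (h₁ : l₁.Pairwise (fun a b => b ≤ a)) (h₂ : l₂.Pairwise (fun a b => b ≤ a))
    (hmem : ∀ x, x ∈ l₁ ↔ x ∈ l₂) : l₁.find? p = l₂.find? p := by
  cases e₁ : l₁.find? p with
  | none =>
    cases e₂ : l₂.find? p with
    | none => rfl
    | some b =>
      have hb := List.find?_some e₂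
      have hbm := (hmem b).mpr (List.mem_of_find?_eq_some e₂)
      exact absurd hb (List.find?_eq_none.mp e₁ b hbm)
  | some a =>
    cases e₂ : l₂.find? p with
    | none =>
      have ha := List.find?_some e₁
      have ham := (hmem a).mp (List.mem_of_find?_eq_some e₁)
      exact absurd ha (List.find?_eq_none.mp e₂ a ham)
    | some b =>
      have hab : a ≤ b := pvFind?_max p l₂ h₂ b e₂ a ((hmem a).mp (List.mem_of_find?_eq_some e₁)) (List.find?_some e₁)
      have hba : b ≤ a := pvFind?_max p l₁ h₁ a e₁ b ((hmem b).mpr (List.mem_of_find?_eq_some e₂)) (List.find?_some e₂)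
      rw [le_antisymm hab hba]

-- step 5: insertion sort produces a weakly sorted list (first key)
lemma pvInsertBy_pairwise {α : Type} (before : α → α → Bool)
    (hA : ∀ a b, before a b = true → before b a = false)
    (hT : ∀ a b c, before a b = true → before b c = true → before a c = true) (x : α) :
    ∀ acc : List α, acc.Pairwise (fun a b => before b a = false) →
      (PySem.List.insertBy before x acc).Pairwise (fun a b => before b a = false) := by
  intro acc
  induction acc with
  | nil => intro _; simp [PySem.List.insertBy]
  | cons y ys ih =>
    intro h
    rw [List.pairwise_cons] at h
    obtain ⟨hy, hys⟩ := h
    simp only [PySem.List.insertBy]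
    by_cases hxy : before x y = true
    · rw [if_pos hxy]
      rw [List.pairwise_cons]
      constructor
      · intro z hz
        rcases List.mem_cons.mp hz with rfl | hz'
        · exact hA x z hxy
        · by_contra hzx
          have hzx' : before z x = true := by
            cases hzxv : before z x
            · exact absurd hzxv hzx
            · rfl
          have := hT z x y hzx' hxy
          rw [hy z hz'] at this
          exact Bool.false_ne_true this
      · exact List.pairwise_cons.mpr ⟨hy, hys⟩
    · rw [if_neg hxy]
      rw [List.pairwise_cons]
      constructor
      · intro z hz
        rcases (PySem.List.mem_insertBy before x z ys).mp hz with rfl | hz'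
        · exact Bool.not_eq_true _ |>.mp hxy ▸ (by cases hv : before z y with
            | false => rfl
            | true => exact absurd hv (by cases hw : before z y <;> simp_all))
        · exact hy z hz'
      · exact ih hys

lemma pvSorted2_pairwise_fst (xs : List (Int × String)) :
    (PySem.List.sorted2 xs (fun p => p.1) (fun p => p.2) false).Pairwise (fun a b => a.1 ≤ b.1) := by
  have hB : ∀ (a b : Int × String),
      (fun a b : Int × String => decide (a.1 < b.1) || (!decide (b.1 < a.1) && decide (a.2 < b.2))) a b = true →
      (fun a b : Int × String => decide (a.1 < b.1) || (!decide (b.1 < a.1) && decide (a.2 < b.2))) b a = false := by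
    intro a b hab
    simp only [Bool.or_eq_true, Bool.and_eq_true, Bool.not_eq_true', decide_eq_true_eq,
      decide_eq_false_iff_not] at hab
    rcases hab with h | ⟨h1, h2⟩
    · have g1 : ¬ b.1 < a.1 := by omega
      simp [g1, h]
    · have g3 : ¬ b.2 < a.2 := fun hc => absurd h2 (lt_asymm hc)
      simp [h1, g3]
  have hT : ∀ (a b c : Int × String),
      (fun a b : Int × String => decide (a.1 < b.1) || (!decide (b.1 < a.1) && decide (a.2 < b.2))) a b = true →
      (fun a b : Int × String => decide (a.1 < b.1) || (!decide (b.1 < a.1) && decide (a.2 < b.2))) b c = true →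
      (fun a b : Int × String => decide (a.1 < b.1) || (!decide (b.1 < a.1) && decide (a.2 < b.2))) a c = true := by
    intro a b c hab hbc
    simp only [Bool.or_eq_true, Bool.and_eq_true, Bool.not_eq_true', decide_eq_true_eq,
      decide_eq_false_iff_not] at hab hbc ⊢
    rcases hab with h | ⟨h1, h2⟩ <;> rcases hbc with g | ⟨g1, g2⟩
    · exact Or.inl (by omega)
    · exact Or.inl (by omega)
    · exact Or.inl (by omega)
    · exact Or.inr ⟨by omega, lt_trans h2 g2⟩
  have key : ∀ (l : List (Int × String)) (acc : List (Int × String)),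
      acc.Pairwise (fun a b =>
        (fun a b : Int × String => decide (a.1 < b.1) || (!decide (b.1 < a.1) && decide (a.2 < b.2))) b a = false) →
      (l.foldl (fun acc x => PySem.List.insertBy
          (fun a b : Int × String => decide (a.1 < b.1) || (!decide (b.1 < a.1) && decide (a.2 < b.2))) x acc) acc).Pairwise
        (fun a b => (fun a b : Int × String => decide (a.1 < b.1) || (!decide (b.1 < a.1) && decide (a.2 < b.2))) b a = false) := by
    intro l
    induction l with
    | nil => intro acc h; exact h
    | cons x rest ih =>
      intro acc h
      rw [List.foldl_cons]
      exact ih _ (pvInsertBy_pairwise _ hB hT x acc h)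
  have hout := key xs [] (by simp)
  have hsorted : PySem.List.sorted2 xs (fun p => p.1) (fun p => p.2) false
      = xs.foldl (fun acc x => PySem.List.insertBy
          (fun a b : Int × String => decide (a.1 < b.1) || (!decide (b.1 < a.1) && decide (a.2 < b.2))) x acc) [] := rfl
  rw [hsorted]
  apply hout.imp
  intro a b hf
  simp only [Bool.or_eq_false_iff, decide_eq_false_iff_not] at hf
  exact Int.not_lt.mp hf.1

lemma pvMatchOut (t : List Char) (oA : Option (Int × String)) (oB : Option Nat)
    (h : Option.map Prod.fst oA = Option.map (fun i : Nat => (i : Int)) oB) :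
    pvOutA t oA = pvOutB t oB := by
  cases oA with
  | none =>
    cases oB with
    | none => rfl
    | some i => simp at h
  | some p =>
    cases oB with
    | none => simp at h
    | some i =>
      simp only [Option.map_some, Option.some.injEq] at h
      show String.ofList (PySem.Chars.strip (PySem.List.slice t (some p.1) none))
          = String.ofList (PySem.Chars.strip (PySem.List.slice t (some (i : Int)) none))
      rw [h]

-- the shared core: both bodies agree for any t, lo of equal length
lemma pvCore (t lo : List Char) (hlen : lo.length = t.length) :
    (if (QUESTION_STARTERS.foldl (fun acc s => pvFindAllA t lo s.toList s (t.length + 1) 0 acc) []).length < 2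
     then String.ofList t
     else pvPickA t ((PySem.List.sorted2
        (QUESTION_STARTERS.foldl (fun acc s => pvFindAllA t lo s.toList s (t.length + 1) 0 acc) [])
        (fun p => p.1) (fun p => p.2) false).reverse))
    = (if ((List.range t.length).foldl
          (fun (st : Int × List Nat) i =>
            if i = 0 ∨ PySem.Chars.isIn [t.getD (i - 1) ' '] (" ,.".toList) = true then
              let m : Int := QUESTION_STARTERS.countP (fun s => PySem.Chars.startswith (List.drop i lo) s.toList)
              if m ≠ 0 then (st.1 + m, st.2 ++ [i]) else st
            else st) (0, [])).1 < 2
       then String.ofList t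
       else pvPickB t ((List.range t.length).foldl
          (fun (st : Int × List Nat) i =>
            if i = 0 ∨ PySem.Chars.isIn [t.getD (i - 1) ' '] (" ,.".toList) = true then
              let m : Int := QUESTION_STARTERS.countP (fun s => PySem.Chars.startswith (List.drop i lo) s.toList)
              if m ≠ 0 then (st.1 + m, st.2 ++ [i]) else st
            else st) (0, [])).2.reverse) := by
  have hS : ∀ s ∈ QUESTION_STARTERS, s.toList ≠ [] := by decide
  -- A's positions list
  have hposs : QUESTION_STARTERS.foldl (fun acc s => pvFindAllA t lo s.toList s (t.length + 1) 0 acc) []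
      = QUESTION_STARTERS.flatMap (fun s => ((List.range t.length).filter (pvOcc t lo s.toList)).map (fun (i : Nat) => ((i : Int), s))) := by
    have hstep : ∀ (acc : List (Int × String)) (s : String), s ∈ QUESTION_STARTERS →
        pvFindAllA t lo s.toList s (t.length + 1) 0 acc
          = acc ++ ((List.range t.length).filter (pvOcc t lo s.toList)).map (fun (i : Nat) => ((i : Int), s)) := by
      intro acc s hs
      have := pvFindAllA_eq t lo s.toList s (hS s hs) hlen (t.length + 1) 0 acc (by omega) (by omega)
      rw [Nat.cast_zero] at this
      rw [this]
      have hps : (fun i => decide (0 ≤ i) && pvOcc t lo s.toList i) = pvOcc t lo s.toList := by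
        funext i; simp
      rw [hps]
    rw [PySem.List.foldl_congr_mem QUESTION_STARTERS _ _ [] hstep]
    rw [PySem.List.foldl_append_eq_flatMap]
    rfl
  -- B's fold, componentwise
  have hB1 : ((List.range t.length).foldl
      (fun (st : Int × List Nat) i =>
        if i = 0 ∨ PySem.Chars.isIn [t.getD (i - 1) ' '] (" ,.".toList) = true then
          let m : Int := QUESTION_STARTERS.countP (fun s => PySem.Chars.startswith (List.drop i lo) s.toList)
          if m ≠ 0 then (st.1 + m, st.2 ++ [i]) else st
        else st) (0, [])).1 = 0 + (((List.range t.length).map (pvG t lo)).sum : Nat) := by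
    rw [pvStepB_foldl t lo]
  have hB2 : ((List.range t.length).foldl
      (fun (st : Int × List Nat) i =>
        if i = 0 ∨ PySem.Chars.isIn [t.getD (i - 1) ' '] (" ,.".toList) = true then
          let m : Int := QUESTION_STARTERS.countP (fun s => PySem.Chars.startswith (List.drop i lo) s.toList)
          if m ≠ 0 then (st.1 + m, st.2 ++ [i]) else st
        else st) (0, [])).2 = [] ++ (List.range t.length).filter (fun i => decide (pvG t lo i ≠ 0)) := by
    rw [pvStepB_foldl t lo]
  rw [hposs, hB1, hB2]
  -- counts agree
  have hcount : (QUESTION_STARTERS.flatMap (fun s => ((List.range t.length).filter (pvOcc t lo s.toList)).map (fun (i : Nat) => ((i : Int), s)))).length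
      = ((List.range t.length).map (pvG t lo)).sum := by
    rw [List.length_flatMap]
    have hsw := pvSwap QUESTION_STARTERS (List.range t.length) (fun s i => pvOcc t lo s.toList i)
    simp only [List.length_map, ← List.countP_eq_length_filter]
    rw [← hsw]
    rfl
  by_cases hlt : (QUESTION_STARTERS.flatMap (fun s => ((List.range t.length).filter (pvOcc t lo s.toList)).map (fun (i : Nat) => ((i : Int), s)))).length < 2
  · rw [if_pos hlt, if_pos (by rw [← hcount]; omega)]
  · rw [if_neg hlt, if_neg (by rw [← hcount]; omega)]
    -- selection agrees
    simp only [List.nil_append]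
    rw [pvPickA_eq, pvPickB_eq]
    set pairs := QUESTION_STARTERS.flatMap (fun s => ((List.range t.length).filter (pvOcc t lo s.toList)).map (fun (i : Nat) => ((i : Int), s))) with hpairs
    set LA := (PySem.List.sorted2 pairs (fun p => p.1) (fun p => p.2) false).reverse with hLA
    set LB := ((List.range t.length).filter (fun i => decide (pvG t lo i ≠ 0))).reverse with hLB
    have h1 : (LA.map Prod.fst).find? (pvCandOK t) = Option.map Prod.fst (LA.find? (fun p => pvCandOK t p.1)) :=
      List.find?_map
    have h2 : (LB.map (fun i : Nat => (i : Int))).find? (pvCandOK t)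
        = Option.map (fun i : Nat => (i : Int)) (LB.find? (fun i : Nat => pvCandOK t (i : Int))) :=
      List.find?_map
    have hpwA : (LA.map Prod.fst).Pairwise (fun a b => b ≤ a) := by
      rw [List.pairwise_map]
      rw [hLA, List.pairwise_reverse]
      exact pvSorted2_pairwise_fst pairs
    have hpwB : (LB.map (fun i : Nat => (i : Int))).Pairwise (fun a b => b ≤ a) := by
      rw [List.pairwise_map]
      rw [hLB, List.pairwise_reverse]
      apply List.Pairwise.imp (fun {a b} h => by exact_mod_cast Int.ofNat_le.mpr (Nat.le_of_lt h))
      exact List.Pairwise.filter _ List.pairwise_lt_range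
    have hmemAB : ∀ (p : Int × String),
        p ∈ PySem.List.sorted2 pairs (fun p => p.1) (fun p => p.2) false ↔ p ∈ pairs :=
      fun p => (PySem.List.sorted2_perm pairs _ _ false).mem_iff
    have hmem : ∀ x, x ∈ LA.map Prod.fst ↔ x ∈ LB.map (fun i : Nat => (i : Int)) := by
      intro x
      constructor
      · intro hx
        obtain ⟨p, hp, rfl⟩ := List.mem_map.mp hx
        rw [hLA, List.mem_reverse] at hp
        have hp' : p ∈ pairs := (hmemAB p).mp hp
        rw [hpairs] at hp'
        obtain ⟨s, hs, hmap⟩ := List.mem_flatMap.mp hp'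
        obtain ⟨i, hfil, rfl⟩ := List.mem_map.mp hmap
        obtain ⟨hir, hocc⟩ := List.mem_filter.mp hfil
        apply List.mem_map.mpr
        refine ⟨i, ?_, rfl⟩
        rw [hLB, List.mem_reverse]
        apply List.mem_filter.mpr
        refine ⟨hir, ?_⟩
        simp only [decide_eq_true_eq]
        intro h0
        exact (List.countP_eq_zero.mp h0) s hs hocc
      · intro hx
        obtain ⟨i, hi, rfl⟩ := List.mem_map.mp hx
        rw [hLB, List.mem_reverse] at hi
        obtain ⟨hir, hg⟩ := List.mem_filter.mp hi
        simp only [decide_eq_true_eq] at hg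
        have hex : ∃ s ∈ QUESTION_STARTERS, pvOcc t lo s.toList i = true := by
          by_contra hno
          push_neg at hno
          exact hg (List.countP_eq_zero.mpr (fun s hs => by simp [hno s hs]))
        obtain ⟨s, hs, hocc⟩ := hex
        apply List.mem_map.mpr
        refine ⟨((i : Int), s), ?_, rfl⟩
        rw [hLA, List.mem_reverse]
        apply (hmemAB _).mpr
        rw [hpairs]
        apply List.mem_flatMap.mpr
        exact ⟨s, hs, List.mem_map.mpr ⟨i, List.mem_filter.mpr ⟨hir, hocc⟩, rfl⟩⟩
    have hfind := pvFind?_eq (pvCandOK t) (LA.map Prod.fst) (LB.map (fun i : Nat => (i : Int))) hpwA hpwB hmem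
    rw [h1, h2] at hfind
    exact pvMatchOut t _ _ hfind

-- ===== VERDICT (by name: the statement is the Claim_ definition above) =====
theorem split_merged_questions_spec : Claim_equal_split_merged_questions := by
  intro text _
  unfold Spec_split_merged_questions
  by_cases htext : text = ""
  · rw [split_merged_questions, split_merged_questions_alt, if_pos htext, if_pos htext]
  · rw [split_merged_questions, split_merged_questions_alt, if_neg htext, if_neg htext]
    exact pvCore _ _ (by simp [PySem.Chars.lower])
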